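-- pv_equiv track=rewrite | github.com/miliar/Code_Jam_Webscraper | solutions_python/Problem_155/2726.py | isEnoughInAudience
-- ===== SOURCE A (Python) =====
-- def isEnoughInAudience(audience):
--     standing = audience[0]
--     enough = True
--     i = 1
--
--     while enough and (i < len(audience)):
--         if standing >= i:
--             standing += audience[i]
--             i += 1
--         else:
--             enough = False
--
--     return enough
-- ===== SOURCE B (Python) =====
-- def isEnoughInAudience(audience):
--     # Phase 1: build the full prefix-sum table (raises IndexError on empty, like A).
--     total = audience[0]
--     sums = [total]
--     for x in audience[1:]:
--         total += x
--         sums.append(total)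
--     # Phase 2: shifted check over the table (sums[j] = sum of first j+1 people).
--     return all(sums[j] >= j + 1 for j in range(len(sums) - 1))
-- ===== Notes on version B (the rewrite author's own statement) =====
-- stated objective: alternative
-- what changed: Replaces A's single while-loop with mixed state (running sum, flag, index, early exit) by a two-phase decomposition: first build the complete prefix-sum table, then verify the shifted condition sums[j] >= j+1 in a separate scan over the table.
import Mathlib
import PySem

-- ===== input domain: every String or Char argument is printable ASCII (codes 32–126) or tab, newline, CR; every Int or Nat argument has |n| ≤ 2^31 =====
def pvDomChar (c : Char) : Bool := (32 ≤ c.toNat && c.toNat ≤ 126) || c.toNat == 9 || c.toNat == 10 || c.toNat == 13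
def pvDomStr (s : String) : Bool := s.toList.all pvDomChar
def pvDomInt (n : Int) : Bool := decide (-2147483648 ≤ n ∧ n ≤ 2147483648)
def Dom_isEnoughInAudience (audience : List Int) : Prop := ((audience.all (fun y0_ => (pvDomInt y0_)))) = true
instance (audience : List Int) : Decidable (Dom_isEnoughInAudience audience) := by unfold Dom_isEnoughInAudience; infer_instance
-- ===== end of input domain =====

-- B rebuilds the check as a prefix-sum table plus a separate shifted scan (objective: alternative decomposition, same cost).

-- ===== PORT A =====
-- the while-loop of A, state (standing, enough, i), step for step
def pvLoopA (audience : List Int) (standing : Int) (enough : Bool) (i : Nat) : Bool :=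
  if h : enough = true ∧ i < audience.length then
    if standing ≥ (i : Int) then
      pvLoopA audience (standing + audience.getD i 0) enough (i + 1)
    else
      pvLoopA audience standing false i
  else enough
termination_by (audience.length - i) + (if enough then 1 else 0)
decreasing_by
  all_goals simp [h.1]
  all_goals omega

def isEnoughInAudience (audience : List Int) : Bool :=
  pvLoopA audience (audience.getD 0 0) true 1

-- ===== PORT B =====
def isEnoughInAudience_alt (audience : List Int) : Bool :=
  -- Phase 1: build the prefix-sum table, as Source B's for-loop (foldl over audience[1:])
  let t0 := audience.getD 0 0
  let acc := (audience.drop 1).foldl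
      (fun (acc : List Int × Int) x => (acc.1 ++ [acc.2 + x], acc.2 + x)) ([t0], t0)
  let sums := acc.1
  -- Phase 2: shifted check over the table
  (List.range (sums.length - 1)).all (fun j => decide (sums.getD j 0 ≥ (j : Int) + 1))

-- ===== PRECONDITION & SPEC =====
-- Pre_ excludes only the empty list, on which A raises IndexError (audience[0]).
def Pre_isEnoughInAudience (audience : List Int) : Prop := audience ≠ []
instance (audience : List Int) : Decidable (Pre_isEnoughInAudience audience) := by
  unfold Pre_isEnoughInAudience; infer_instance

def pvWitness_isEnoughInAudience : List Int := [2, 0, 1]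

def Spec_isEnoughInAudience (audience : List Int) (out : Bool) : Prop := out = isEnoughInAudience_alt audience
instance (audience : List Int) (out : Bool) : Decidable (Spec_isEnoughInAudience audience out) := by unfold Spec_isEnoughInAudience; infer_instance

-- ===== CLAIM (what is proved, stated in full; the proofs are below) =====
def Claim_equal_isEnoughInAudience : Prop := ∀ (audience : List Int), Dom_isEnoughInAudience audience → Pre_isEnoughInAudience audience → Spec_isEnoughInAudience audience (isEnoughInAudience audience)

-- ===== LEMMAS AND PROOFS =====

-- A's loop from a dead flag returns false
lemma pvLoopA_false (a : List Int) (s : Int) (i : Nat) : pvLoopA a s false i = false := by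
  unfold pvLoopA; simp

-- characterisation of A's loop: run from i with standing = sum of the first i elements
lemma pvLoopA_spec (a : List Int) (i : Nat) (s : Int) (hsum : s = (a.take i).sum) :
    (pvLoopA a s true i = true)
      ↔ (∀ j, i ≤ j → j < a.length → ((a.take j).sum ≥ (j : Int))) := by
  subst hsum
  by_cases hi : i < a.length
  · rw [pvLoopA, dif_pos ⟨rfl, hi⟩]
    by_cases hs : (a.take i).sum ≥ (i : Int)
    · rw [if_pos hs]
      have hstep : (a.take i).sum + a.getD i 0 = (a.take (i + 1)).sum := by
        rw [List.getD_eq_getElem?_getD, List.getElem?_eq_getElem hi, List.take_add_one,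
          List.sum_append]
        simp [List.getElem?_eq_getElem hi]
      rw [hstep, pvLoopA_spec a (i + 1) _ rfl]
      constructor
      · intro h j hij hj
        rcases Nat.eq_or_lt_of_le hij with rfl | hlt
        · exact hs
        · exact h j hlt hj
      · intro h j hij hj
        exact h j (Nat.le_of_succ_le hij) hj
    · rw [if_neg hs, pvLoopA_false]
      simp only [Bool.false_eq_true, false_iff]
      intro hall
      exact hs (hall i le_rfl hi)
  · rw [pvLoopA, dif_neg (by simp [hi])]
    simp only [true_iff]
    intro j hij hj
    exact absurd hj (by omega)
termination_by a.length - i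
decreasing_by omega

-- the prefix sums produced by B's fold, as a simple recursive list
def pvPrefs : List Int → Int → List Int
  | [], _ => []
  | x :: xs, t => (t + x) :: pvPrefs xs (t + x)

lemma pvFold_eq_prefs (xs : List Int) (l : List Int) (t : Int) :
    (xs.foldl (fun (acc : List Int × Int) x => (acc.1 ++ [acc.2 + x], acc.2 + x)) (l, t)).1
      = l ++ pvPrefs xs t := by
  induction xs generalizing l t with
  | nil => simp [pvPrefs]
  | cons x xs ih => simp [pvPrefs, List.foldl_cons, ih, List.append_assoc]

lemma pvPrefs_length (xs : List Int) (t : Int) : (pvPrefs xs t).length = xs.length := by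
  induction xs generalizing t with
  | nil => rfl
  | cons x xs ih => simp [pvPrefs, ih]

lemma pvPrefs_getD (xs : List Int) (t : Int) (j : Nat) (hj : j < xs.length) :
    (pvPrefs xs t).getD j 0 = t + (xs.take (j + 1)).sum := by
  induction xs generalizing t j with
  | nil => simp at hj
  | cons x xs ih =>
    cases j with
    | zero => simp [pvPrefs]
    | succ k =>
      simp only [pvPrefs, List.getD_cons_succ, List.take_succ_cons, List.sum_cons]
      rw [ih (t + x) k (by simpa using hj)]
      ring

-- B's table indexed: entry j is the sum of the first j+1 elements
lemma pvSums_getD (h : Int) (rest : List Int) (j : Nat) (hj : j < rest.length + 1) :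
    ((h :: pvPrefs rest h).getD j 0) = (((h :: rest).take (j + 1)).sum) := by
  cases j with
  | zero => simp
  | succ k =>
    simp only [List.getD_cons_succ, List.take_succ_cons, List.sum_cons]
    rw [pvPrefs_getD rest h k (by omega)]

-- ===== VERDICT (by name: the statement is the Claim_ definition above) =====
theorem isEnoughInAudience_spec : Claim_equal_isEnoughInAudience := by
  intro audience _ hpre
  unfold Spec_isEnoughInAudience
  obtain ⟨h, rest, rfl⟩ : ∃ x xs, audience = x :: xs := by
    cases audience with
    | nil => exact absurd rfl hpre
    | cons x xs => exact ⟨x, xs, rfl⟩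
  unfold isEnoughInAudience isEnoughInAudience_alt
  simp only [List.getD_cons_zero, List.drop_one, List.tail_cons]
  rw [pvFold_eq_prefs rest [h] h, List.singleton_append]
  have hlen : (h :: pvPrefs rest h).length = rest.length + 1 := by
    simp [pvPrefs_length]
  rw [Bool.eq_iff_iff]
  rw [pvLoopA_spec (h :: rest) 1 h (by simp)]
  simp only [List.all_eq_true, List.mem_range, decide_eq_true_iff, hlen,
    Nat.add_sub_cancel]
  constructor
  · intro hall j hj
    rw [pvSums_getD h rest j (by omega)]
    have := hall (j + 1) (by omega) (by simp; omega)
    simpa using this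
  · intro hall j hj1 hj2
    obtain ⟨k, rfl⟩ : ∃ k, j = k + 1 := ⟨j - 1, by omega⟩
    have hk : k < rest.length := by simp at hj2; omega
    have := hall k hk
    rw [pvSums_getD h rest k (by omega)] at this
    simpa using this
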